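-- pv_equiv track=rewrite | github.com/Mosai-K/Python-code-challenge | team_league_calculator.py | format_ranking_results
-- ===== SOURCE A (Python) =====
-- def format_ranking_results(order_teams):
--   output = []
--   points = ""
--   current_rank = 0
--   last_point = None
--   for i, (team, score) in enumerate(order_teams, start = 1):
--     points = "pts" if score !=  1 else "pt"
--     if score != last_point:
--       current_rank = i
--     output.append(f"{current_rank}. {team}: {score} {points}")
--     last_point = score
--   return "\n".join(output)
-- ===== SOURCE B (Python) =====
-- def format_ranking_results(order_teams):
--     lines = []
--     n = len(order_teams)
--     i = 0
--     while i < n: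
--         score = order_teams[i][1]
--         j = i + 1
--         while j < n and order_teams[j][1] == score:
--             j += 1
--         rank = i + 1  # shared rank = 1-based position of the run's first team
--         points = "pt" if score == 1 else "pts"
--         for team, _ in order_teams[i:j]:
--             lines.append(f"{rank}. {team}: {score} {points}")
--         i = j
--     return "\n".join(lines)
-- ===== Notes on version B (the rewrite author's own statement) =====
-- stated objective: alternative
-- what changed: B partitions the list into consecutive runs of equal score (inner scan to find the run end) and emits each run's lines with the run-start position as the shared rank, instead of A's single element-wise pass threading last_point/current_rank state.
import Mathlib
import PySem

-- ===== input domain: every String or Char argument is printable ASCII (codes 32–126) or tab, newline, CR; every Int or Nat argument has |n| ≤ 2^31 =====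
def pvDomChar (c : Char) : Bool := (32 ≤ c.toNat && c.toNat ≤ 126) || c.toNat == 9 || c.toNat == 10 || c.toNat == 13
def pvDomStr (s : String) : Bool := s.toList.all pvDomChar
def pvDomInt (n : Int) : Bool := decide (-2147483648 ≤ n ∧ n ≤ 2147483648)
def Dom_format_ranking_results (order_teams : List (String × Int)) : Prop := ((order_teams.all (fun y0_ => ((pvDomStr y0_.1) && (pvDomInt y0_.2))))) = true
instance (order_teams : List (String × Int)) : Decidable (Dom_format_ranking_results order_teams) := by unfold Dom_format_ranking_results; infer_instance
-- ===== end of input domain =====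

-- B re-derives each line's rank from the start position of its run of equal scores
-- (one run at a time) instead of A's element-wise pass threading last_point/current_rank.

-- shared f-string "{rank}. {team}: {score} {points}" with points = "pts" iff score ≠ 1
def pvLine (rank : Int) (team : String) (score : Int) : String :=
  PySem.Int.toStr rank ++ ". " ++ team ++ ": " ++ PySem.Int.toStr score ++ " " ++
    (if score = 1 then "pt" else "pts")

-- ===== PORT A =====
-- A's for-loop: i is the 1-based enumerate counter; state = (output, current_rank, last_point)
def pvALoop (ts : List (String × Int)) (i : Int) (output : List String)
    (current_rank : Int) (last_point : Option Int) : List String :=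
  match ts with
  | [] => output
  | (team, score) :: rest =>
    let rank := if some score ≠ last_point then i else current_rank
    pvALoop rest (i + 1) (output ++ [pvLine rank team score]) rank (some score)

def format_ranking_results (order_teams : List (String × Int)) : String :=
  PySem.Str.join "\n" (pvALoop order_teams 1 [] 0 none)

-- ===== PORT B =====
-- B's outer while-loop over the remaining suffix: the inner while that advances j past
-- equal scores is takeWhile/dropWhile on the tail; pos is the 1-based index of the run head.
def pvBLoop (rest : List (String × Int)) (pos : Int) (lines : List String) : List String :=
  match rest with
  | [] => lines
  | (team0, score) :: tl =>
    let run := (team0, score) :: tl.takeWhile (fun p => p.2 == score)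
    pvBLoop (tl.dropWhile (fun p => p.2 == score)) (pos + (run.length : Int))
      (lines ++ run.map (fun p => pvLine pos p.1 score))
termination_by rest.length
decreasing_by
  simp only [List.length_cons]
  exact Nat.lt_succ_of_le (tl.length_dropWhile_le _)

def format_ranking_results_alt (order_teams : List (String × Int)) : String :=
  PySem.Str.join "\n" (pvBLoop order_teams 1 [])

-- ===== PRECONDITION & SPEC =====
def Spec_format_ranking_results (order_teams : List (String × Int)) (out : String) : Prop := out = format_ranking_results_alt order_teams
instance (order_teams : List (String × Int)) (out : String) : Decidable (Spec_format_ranking_results order_teams out) := by unfold Spec_format_ranking_results; infer_instance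

-- ===== CLAIM (what is proved, stated in full; the proofs are below) =====
def Claim_equal_format_ranking_results : Prop := ∀ (order_teams : List (String × Int)), Dom_format_ranking_results order_teams → Spec_format_ranking_results order_teams (format_ranking_results order_teams)

-- ===== LEMMAS AND PROOFS =====

-- the simultaneous invariant: (1) at a fresh score (last_point differs from the head's
-- score, or the list is empty) A's loop coincides with B's run loop; (2) mid-run with
-- last_point = some s, A's loop finishes the run at rank r and continues as B does.
theorem pvLoops (ts : List (String × Int)) :
    (∀ (i : Int) (output : List String) (r : Int) (lp : Option Int),
        (∀ t s tl', ts = (t, s) :: tl' → lp ≠ some s) →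
        pvALoop ts i output r lp = pvBLoop ts i output) ∧
    (∀ (i : Int) (output : List String) (r s : Int),
        pvALoop ts i output r (some s)
          = pvBLoop (ts.dropWhile (fun p => p.2 == s))
              (i + ((ts.takeWhile (fun p => p.2 == s)).length : Int))
              (output ++ (ts.takeWhile (fun p => p.2 == s)).map (fun p => pvLine r p.1 s))) := by
  induction ts with
  | nil =>
    constructor
    · intro i output r lp _; simp [pvALoop, pvBLoop]
    · intro i output r s; simp [pvALoop, pvBLoop]
  | cons hd tl ih =>
    obtain ⟨t, s⟩ := hd
    have c1 : ∀ (i : Int) (output : List String) (r : Int) (lp : Option Int),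
        (∀ t' s' tl', (t, s) :: tl = (t', s') :: tl' → lp ≠ some s') →
        pvALoop ((t, s) :: tl) i output r lp = pvBLoop ((t, s) :: tl) i output := by
      intro i output r lp h
      have hlp : lp ≠ some s := h t s tl rfl
      have hne : some s ≠ lp := fun e => hlp e.symm
      rw [pvALoop, pvBLoop]
      simp only [if_pos hne]
      rw [ih.2]
      simp only [List.length_cons, List.map_cons, List.append_assoc, List.singleton_append]
      congr 1
      push_cast; ring
    refine ⟨c1, ?_⟩
    intro i output r s'
    by_cases hss : s = s'
    · subst hss
      rw [pvALoop]
      have hcond : ¬ (some s ≠ some s) := by simp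
      simp only [if_neg hcond]
      rw [ih.2 (i + 1) (output ++ [pvLine r t s]) r s]
      simp only [List.takeWhile_cons, List.dropWhile_cons, beq_self_eq_true, if_pos,
        List.length_cons, List.map_cons, List.append_assoc, List.singleton_append]
      congr 1
      push_cast; ring
    · have htw : ((t, s) :: tl).takeWhile (fun p => p.2 == s') = [] := by
        simp [hss]
      have hdw : ((t, s) :: tl).dropWhile (fun p => p.2 == s') = (t, s) :: tl := by
        simp [hss]
      rw [htw, hdw]
      simp only [List.length_nil, List.map_nil, List.append_nil, Int.natCast_zero, add_zero]
      refine c1 i output r (some s') ?_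
      intro t' s'' tl' he hEq
      cases he
      exact hss (Option.some.inj hEq).symm

-- ===== VERDICT (by name: the statement is the Claim_ definition above) =====
theorem format_ranking_results_spec : Claim_equal_format_ranking_results := by
  intro ts _
  unfold Spec_format_ranking_results format_ranking_results format_ranking_results_alt
  congr 1
  exact (pvLoops ts).1 1 [] 0 none (by intro _ _ _ _ h; simp at h)
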